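-- pv_equiv track=rewrite | github.com/Cyberloafingg/Requet-2022ML-HW | GenerateLabel.py | smooth_status
-- ===== SOURCE A (Python) =====
-- MinTime_stall = 10
--
-- Thr_ss = 15
--
-- def smooth_status(status_, m_t):
--     status_smooth = status_.copy()
--     now_index = 0
--     # last_index = 0
--     while now_index < len(status_smooth):
--         if status_smooth[now_index] == 0:
--             last_index = now_index
--             end = min(len(status_smooth), now_index + MinTime_stall * 10 + 1)
--             for j in range(now_index + 1, end):
--                 if status_smooth[j] == 0:
--                     last_index = j
--             for j in range(now_index + 1, last_index + 1):
--                 status_smooth[j] = 0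
--             if last_index != now_index:
--                 now_index = last_index
--             else:
--                 now_index = now_index + 1
--         else:
--             now_index = now_index + 1
--
--     now_index = 0
--     while now_index < len(status_smooth):
--         if status_smooth[now_index] == 1:
--             last_index = now_index
--             end = min(len(status_smooth), now_index + MinTime_stall * 10 + 1)
--             for j in range(now_index + 1, end):
--                 if status_smooth[j] == 1:
--                     last_index = j
--             for j in range(now_index + 1, last_index + 1):
--                 status_smooth[j] = 1
--             if last_index != now_index:
--                 now_index = last_index
--             else:
--                 now_index = now_index + 1
--         else:
--             now_index = now_index + 1
--
--     num = [0 for _ in range(len(status_smooth))]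
--     num[0] = 1
--     for now_index in range(1, len(status_smooth)):
--         if status_smooth[now_index] == 1:
--             if status_smooth[now_index - 1] == 1:
--                 num[now_index] = num[now_index - 1] + 1
--             else:
--                 num[now_index] = 1
--                 if num[now_index - 1] <= Thr_ss * 10:
--                     for j in range(now_index - 1, -1, -1):
--                         if status_smooth[j] == 1:
--                             status_smooth[j] = 3 if m_t[j] >= 0 else 2
--                         else:
--                             break
--
--     return status_smooth
-- ===== SOURCE B (Python) =====
-- # Single forward pass per label value tracking the last matching index; bridges
-- # gaps <= 100 between consecutive occurrences. A's third (run-length) pass never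
-- # changes the array (its backward relabel loop breaks immediately), so B omits it.
-- def smooth_status(status_, m_t):
--     out = list(status_)
--     for v in (0, 1):
--         last = None
--         for i, x in enumerate(out):
--             if x == v:
--                 if last is not None and i - last <= 100:
--                     for j in range(last + 1, i):
--                         out[j] = v
--                 last = i
--     return out
-- ===== Notes on version B (the rewrite author's own statement) =====
-- stated objective: faster
-- what changed: Replaces A's windowed rescan-and-jump while-loops by one forward pass per label value that remembers the last occurrence and bridges gaps <= 100, and drops A's entire third (num/backward-relabel) pass, which provably never changes the array.
import Mathlib
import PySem

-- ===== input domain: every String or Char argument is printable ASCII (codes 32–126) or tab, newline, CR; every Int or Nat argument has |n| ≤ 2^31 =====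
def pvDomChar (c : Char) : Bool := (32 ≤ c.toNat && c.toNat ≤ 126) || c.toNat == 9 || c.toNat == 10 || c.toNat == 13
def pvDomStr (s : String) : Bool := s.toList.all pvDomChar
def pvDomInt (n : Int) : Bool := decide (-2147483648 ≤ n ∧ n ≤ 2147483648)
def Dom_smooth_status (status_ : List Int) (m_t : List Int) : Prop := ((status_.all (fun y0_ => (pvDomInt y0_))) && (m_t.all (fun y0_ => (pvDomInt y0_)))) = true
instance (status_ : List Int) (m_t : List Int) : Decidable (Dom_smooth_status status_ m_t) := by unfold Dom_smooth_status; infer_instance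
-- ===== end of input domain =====

-- B replaces A's two windowed rescan-and-jump passes by one forward pass per label
-- value (bridging when the gap between consecutive occurrences is ≤ 100) and drops
-- A's third pass, which provably never changes the array.

-- ===== PORT A =====
-- shared helper: 'for j in range(a, b): arr[j] = v'  (used by both ports' fill loops)
def pvFill (xs : List Int) (v : Int) (a b : Nat) : List Int :=
  (List.range' a (b - a)).foldl (fun ys j => ys.set j v) xs

-- A's inner window scan: 'for j in range(now+1, end): if arr[j] == v: last = j'
def aScan (xs : List Int) (v : Int) (js : List Nat) (last : Nat) : Nat :=
  match js with
  | [] => last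
  | j :: r => aScan xs v r (if xs.getD j 0 = v then j else last)

-- 'last_index' after A's window scan at position now ('end' = min(len, now + 101))
def aLast (xs : List Int) (v : Int) (now : Nat) : Nat :=
  aScan xs v (List.range' (now + 1) (min xs.length (now + 101) - (now + 1))) now

-- one of A's two 'while now_index < len' gap-filling loops; now_index strictly
-- increases every iteration, so fuel = len (passed at the call site) suffices and
-- the loop exits exactly when now_index reaches len, as in the Python.
def aPassGo (v : Int) : Nat → List Int → Nat → List Int
  | 0, xs, _ => xs
  | fuel + 1, xs, now =>
    if now < xs.length then
      if xs.getD now 0 = v then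
        if aLast xs v now ≠ now then
          aPassGo v fuel (pvFill xs v (now + 1) (aLast xs v now + 1)) (aLast xs v now)
        else aPassGo v fuel (pvFill xs v (now + 1) (aLast xs v now + 1)) (now + 1)
      else aPassGo v fuel xs (now + 1)
    else xs

-- backward relabel loop of the third pass: 'for j in range(now-1, -1, -1): …'.
-- Python's m_t[j] raises IndexError if j ≥ len(m_t); that read is only reached when
-- status[j] == 1, which never happens (the loop always breaks at its first index),
-- so pyGetD is used as a total stand-in for the unreachable read.
def aBack (m_t : List Int) (js : List Nat) (st : List Int) : List Int :=
  match js with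
  | [] => st
  | j :: r =>
    if st.getD j 0 = 1 then
      aBack m_t r (st.set j (if 0 ≤ PySem.List.pyGetD m_t (j : Int) 0 then 3 else 2))
    else st

-- one iteration of 'for now_index in range(1, len)': state = (num, status_smooth)
def aThirdStep (m_t : List Int) (s : List Int × List Int) (i : Nat) : List Int × List Int :=
  if s.2.getD i 0 = 1 then
    if s.2.getD (i - 1) 0 = 1 then (s.1.set i (s.1.getD (i - 1) 0 + 1), s.2)
    else
      if (s.1.set i 1).getD (i - 1) 0 ≤ 150 then (s.1.set i 1, aBack m_t (List.range i).reverse s.2)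
      else (s.1.set i 1, s.2)
  else s

def smooth_status (status_ : List Int) (m_t : List Int) : List Int :=
  let s1 := aPassGo 0 status_.length status_ 0
  let s2 := aPassGo 1 s1.length s1 0
  let num0 := (List.replicate s2.length (0 : Int)).set 0 1
  ((List.range' 1 (s2.length - 1)).foldl (aThirdStep m_t) (num0, s2)).2

-- ===== PORT B =====
-- B's forward pass: 'for i, x in enumerate(out)' (fuel = one unit per index,
-- len(out) at the call site), remembering the index of the last occurrence of v;
-- on a new occurrence at i with i - last ≤ 100, fill the gap (last+1 .. i-1).
def bLoopGo (v : Int) : Nat → List Int → Nat → Option Nat → List Int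
  | 0, out, _, _ => out
  | n + 1, out, i, last =>
    if out.getD i 0 = v then
      match last with
      | some p =>
        if i - p ≤ 100 then bLoopGo v n (pvFill out v (p + 1) i) (i + 1) (some i)
        else bLoopGo v n out (i + 1) (some i)
      | none => bLoopGo v n out (i + 1) (some i)
    else bLoopGo v n out (i + 1) last

def smooth_status_alt (status_ : List Int) (m_t : List Int) : List Int :=
  let s1 := bLoopGo 0 status_.length status_ 0 none
  bLoopGo 1 s1.length s1 0 none

-- ===== PRECONDITION & SPEC =====
-- Pre_ excludes only the empty status list, on which Python A raises IndexError
-- (num[0] = 1 on an empty num).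
def Pre_smooth_status (status_ : List Int) (m_t : List Int) : Prop := status_ ≠ []
instance (status_ : List Int) (m_t : List Int) : Decidable (Pre_smooth_status status_ m_t) := by
  unfold Pre_smooth_status; infer_instance

def pvWitness_smooth_status : List Int × List Int := ([0, 5, 0], [1, -1, 2])

def Spec_smooth_status (status_ : List Int) (m_t : List Int) (out : List Int) : Prop :=
  out = smooth_status_alt status_ m_t
instance (status_ : List Int) (m_t : List Int) (out : List Int) : Decidable (Spec_smooth_status status_ m_t out) := by
  unfold Spec_smooth_status; infer_instance

-- ===== CLAIM (what is proved, stated in full; the proofs are below) =====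
def Claim_equal_smooth_status : Prop := ∀ (status_ : List Int) (m_t : List Int), Dom_smooth_status status_ m_t → Pre_smooth_status status_ m_t → Spec_smooth_status status_ m_t (smooth_status status_ m_t)

-- ===== LEMMAS AND PROOFS =====

theorem pvFill_length (xs : List Int) (v : Int) (a b : Nat) :
    (pvFill xs v a b).length = xs.length := by
  unfold pvFill
  generalize List.range' a (b - a) = js
  induction js generalizing xs with
  | nil => rfl
  | cons j r ih => simpa [List.foldl] using ih (xs.set j v)

theorem aScan_range' (xs : List Int) (v : Int) :
    ∀ (n a last : Nat),
      (aScan xs v (List.range' a n) last = last ∧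
        ∀ j, a ≤ j → j < a + n → xs.getD j 0 ≠ v) ∨
      (a ≤ aScan xs v (List.range' a n) last ∧ aScan xs v (List.range' a n) last < a + n ∧
        xs.getD (aScan xs v (List.range' a n) last) 0 = v ∧
        ∀ j, aScan xs v (List.range' a n) last < j → j < a + n → xs.getD j 0 ≠ v) := by
  intro n
  induction n with
  | zero => intro a last; exact Or.inl ⟨rfl, fun j h1 h2 => absurd (Nat.lt_of_le_of_lt h1 h2) (by omega)⟩
  | succ m ih =>
    intro a last
    rw [List.range'_succ, aScan]
    by_cases hv : xs.getD a 0 = v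
    · simp only [if_pos hv]
      rcases ih (a+1) a with ⟨h1, h2⟩ | ⟨h1, h2, h3, h4⟩
      · right
        refine ⟨by omega, by omega, by rw [h1]; exact hv, ?_⟩
        intro j hj1 hj2; rw [h1] at hj1; exact h2 j (by omega) (by omega)
      · right
        exact ⟨by omega, by omega, h3, fun j hj1 hj2 => h4 j hj1 (by omega)⟩
    · simp only [if_neg hv]
      rcases ih (a+1) last with ⟨h1, h2⟩ | ⟨h1, h2, h3, h4⟩
      · left
        refine ⟨h1, fun j hj1 hj2 => ?_⟩
        rcases Nat.eq_or_lt_of_le hj1 with h | h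
        · rwa [← h]
        · exact h2 j (by omega) (by omega)
      · right
        exact ⟨by omega, by omega, h3, fun j hj1 hj2 => h4 j hj1 (by omega)⟩

theorem aLast_cases (xs : List Int) (v : Int) (now : Nat) :
    (aLast xs v now = now ∧
      ∀ j, now + 1 ≤ j → j < min xs.length (now + 101) → xs.getD j 0 ≠ v) ∨
    (now + 1 ≤ aLast xs v now ∧ aLast xs v now < min xs.length (now + 101) ∧
      xs.getD (aLast xs v now) 0 = v ∧
      ∀ j, aLast xs v now < j → j < min xs.length (now + 101) → xs.getD j 0 ≠ v) := by
  have h := aScan_range' xs v (min xs.length (now + 101) - (now + 1)) (now + 1) now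
  unfold aLast
  by_cases hl : now + 1 ≤ min xs.length (now + 101)
  · rcases h with ⟨h1, h2⟩ | ⟨h1, h2, h3, h4⟩
    · exact Or.inl ⟨h1, fun j hj1 hj2 => h2 j hj1 (by omega)⟩
    · exact Or.inr ⟨h1, by omega, h3, fun j hj1 hj2 => h4 j hj1 (by omega)⟩
  · rcases h with ⟨h1, _⟩ | ⟨h1, h2, _, _⟩
    · exact Or.inl ⟨h1, fun j hj1 hj2 => absurd (by omega : now + 1 ≤ min xs.length (now + 101)) hl⟩
    · omega

theorem pvFill_empty (xs : List Int) (v : Int) (a b : Nat) (h : b ≤ a) :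
    pvFill xs v a b = xs := by
  unfold pvFill
  rw [Nat.sub_eq_zero_of_le h]
  rfl

theorem pvFill_succ (xs : List Int) (v : Int) (a b : Nat) (h : a ≤ b) :
    pvFill xs v a (b + 1) = (pvFill xs v a b).set b v := by
  unfold pvFill
  have : b + 1 - a = (b - a) + 1 := by omega
  rw [this, List.range'_concat, List.foldl_append]
  simp only [List.foldl]
  congr 2
  omega

theorem pvFill_getD_ge (xs : List Int) (v : Int) (a b j : Nat) (h : b ≤ j) :
    (pvFill xs v a b).getD j 0 = xs.getD j 0 := by
  induction b with
  | zero => rw [pvFill_empty xs v a 0 (Nat.zero_le a)]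
  | succ m ih =>
    by_cases ha : a ≤ m
    · rw [pvFill_succ xs v a m ha]
      rw [List.getD_eq_getElem?_getD, List.getElem?_set_ne (by omega), ← List.getD_eq_getElem?_getD]
      exact ih (by omega)
    · rw [pvFill_empty xs v a (m+1) (by omega)]

theorem pvFill_getD_in (xs : List Int) (v : Int) (a b j : Nat)
    (h1 : a ≤ j) (h2 : j < b) (h3 : j < xs.length) :
    (pvFill xs v a b).getD j 0 = v := by
  induction b with
  | zero => omega
  | succ m ih =>
    have ha : a ≤ m := by omega
    rw [pvFill_succ xs v a m ha]
    by_cases hj : j = m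
    · subst hj
      rw [List.getD_eq_getElem?_getD]
      have : j < (pvFill xs v a j).length := by rw [pvFill_length]; exact h3
      simp [this]
    · rw [List.getD_eq_getElem?_getD, List.getElem?_set_ne (by omega), ← List.getD_eq_getElem?_getD]
      exact ih (by omega)

theorem pvFill_comp (xs : List Int) (v : Int) (a b c : Nat) (h1 : a ≤ b) (h2 : b ≤ c) :
    pvFill (pvFill xs v a b) v b c = pvFill xs v a c := by
  unfold pvFill
  rw [← List.foldl_append]
  congr 1
  calc List.range' a (b - a) ++ List.range' b (c - b)
      = List.range' a (b - a) ++ List.range' (a + 1 * (b - a)) (c - b) := by rw [show a + 1 * (b - a) = b by omega]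
    _ = List.range' a ((b - a) + (c - b)) := List.range'_append
    _ = List.range' a (c - a) := by congr 1; omega

theorem set_self_of_getD (xs : List Int) (j : Nat) (v : Int) (h : j < xs.length)
    (hv : xs.getD j 0 = v) : xs.set j v = xs := by
  have h' : xs[j]? = some v := by
    rw [List.getD_eq_getElem?_getD, List.getElem?_eq_getElem h] at hv
    rw [List.getElem?_eq_getElem h]
    exact congrArg some (by simpa using hv)
  apply List.ext_getElem?
  intro n
  by_cases hn : j = n
  · subst hn
    rw [List.getElem?_set]
    rw [if_pos rfl, if_pos h]
    exact h'.symm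
  · rw [List.getElem?_set]
    simp [hn]

-- step equations for the two loops
theorem bLoopGo_succ (v : Int) (n : Nat) (out : List Int) (i : Nat) (last : Option Nat) :
    bLoopGo v (n + 1) out i last =
      if out.getD i 0 = v then
        match last with
        | some p =>
          if i - p ≤ 100 then bLoopGo v n (pvFill out v (p + 1) i) (i + 1) (some i)
          else bLoopGo v n out (i + 1) (some i)
        | none => bLoopGo v n out (i + 1) (some i)
      else bLoopGo v n out (i + 1) last := rfl

theorem bLoopGo_nv (v : Int) (n : Nat) (out : List Int) (i : Nat) (last : Option Nat)
    (h : out.getD i 0 ≠ v) :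
    bLoopGo v (n + 1) out i last = bLoopGo v n out (i + 1) last := by
  rw [bLoopGo_succ, if_neg h]

theorem bLoopGo_none (v : Int) (n : Nat) (out : List Int) (i : Nat)
    (h : out.getD i 0 = v) :
    bLoopGo v (n + 1) out i none = bLoopGo v n out (i + 1) (some i) := by
  rw [bLoopGo_succ, if_pos h]

theorem bLoopGo_near (v : Int) (n : Nat) (out : List Int) (i p : Nat)
    (h : out.getD i 0 = v) (h3 : i - p ≤ 100) :
    bLoopGo v (n + 1) out i (some p) = bLoopGo v n (pvFill out v (p + 1) i) (i + 1) (some i) := by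
  rw [bLoopGo_succ, if_pos h]
  exact if_pos h3

theorem bLoopGo_far (v : Int) (n : Nat) (out : List Int) (i p : Nat)
    (h : out.getD i 0 = v) (h3 : ¬ i - p ≤ 100) :
    bLoopGo v (n + 1) out i (some p) = bLoopGo v n out (i + 1) (some i) := by
  rw [bLoopGo_succ, if_pos h]
  exact if_neg h3

theorem aPassGo_succ (v : Int) (n : Nat) (xs : List Int) (now : Nat) :
    aPassGo v (n + 1) xs now =
      if now < xs.length then
        if xs.getD now 0 = v then
          if aLast xs v now ≠ now then
            aPassGo v n (pvFill xs v (now + 1) (aLast xs v now + 1)) (aLast xs v now)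
          else aPassGo v n (pvFill xs v (now + 1) (aLast xs v now + 1)) (now + 1)
        else aPassGo v n xs (now + 1)
      else xs := rfl

theorem aPassGo_stop (v : Int) (n : Nat) (xs : List Int) (now : Nat)
    (h : ¬ now < xs.length) : aPassGo v (n + 1) xs now = xs := by
  rw [aPassGo_succ, if_neg h]

theorem aPassGo_nv (v : Int) (n : Nat) (xs : List Int) (now : Nat)
    (h1 : now < xs.length) (h2 : xs.getD now 0 ≠ v) :
    aPassGo v (n + 1) xs now = aPassGo v n xs (now + 1) := by
  rw [aPassGo_succ, if_pos h1, if_neg h2]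

theorem aPassGo_jump (v : Int) (n : Nat) (xs : List Int) (now : Nat)
    (h1 : now < xs.length) (h2 : xs.getD now 0 = v) (h3 : aLast xs v now ≠ now) :
    aPassGo v (n + 1) xs now =
      aPassGo v n (pvFill xs v (now + 1) (aLast xs v now + 1)) (aLast xs v now) := by
  rw [aPassGo_succ, if_pos h1, if_pos h2, if_pos h3]

theorem aPassGo_stay (v : Int) (n : Nat) (xs : List Int) (now : Nat)
    (h1 : now < xs.length) (h2 : xs.getD now 0 = v) (h3 : aLast xs v now = now) :
    aPassGo v (n + 1) xs now =
      aPassGo v n (pvFill xs v (now + 1) (aLast xs v now + 1)) (now + 1) := by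
  rw [aPassGo_succ, if_pos h1, if_pos h2, if_neg (by simpa using h3)]

-- B's array state while walking the bridged window: everything up to the last seen
-- occurrence p is already filled.
theorem bridge (v : Int) (xs : List Int) (now L : Nat)
    (hLlen : L < xs.length) (hLwin : L ≤ now + 100) (hLv : xs.getD L 0 = v) :
    ∀ (d i p : Nat), L + 1 - i ≤ d → now ≤ p → p < i → i ≤ L + 1 →
      (∀ j, p < j → j < i → xs.getD j 0 ≠ v) →
      bLoopGo v (xs.length - i) (pvFill xs v (now + 1) (p + 1)) i (some p) =
        bLoopGo v (xs.length - (L + 1)) (pvFill xs v (now + 1) (L + 1)) (L + 1) (some L) := by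
  intro d
  induction d with
  | zero =>
    intro i p hd hp1 hp2 hi hnov
    have hiL : i = L + 1 := by omega
    have hpL : p = L := by
      by_contra hne
      exact hnov L (by omega) (by omega) hLv
    rw [hiL, hpL]
  | succ m ih =>
    intro i p hd hp1 hp2 hi hnov
    by_cases hiL : i = L + 1
    · have hpL : p = L := by
        by_contra hne
        exact hnov L (by omega) (by omega) hLv
      rw [hiL, hpL]
    · have hilt : i ≤ L := by omega
      have hget : (pvFill xs v (now + 1) (p + 1)).getD i 0 = xs.getD i 0 :=
        pvFill_getD_ge xs v (now + 1) (p + 1) i (by omega)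
      have hfe : xs.length - i = (xs.length - (i + 1)) + 1 := by omega
      rw [hfe]
      by_cases hv : xs.getD i 0 = v
      · rw [bLoopGo_near v _ _ i p (by rw [hget]; exact hv) (by omega)]
        have harr : pvFill (pvFill xs v (now + 1) (p + 1)) v (p + 1) i =
            pvFill xs v (now + 1) (i + 1) := by
          rw [pvFill_comp xs v (now + 1) (p + 1) i (by omega) (by omega)]
          rw [pvFill_succ xs v (now + 1) i (by omega)]
          rw [set_self_of_getD _ i v (by rw [pvFill_length]; omega)
            (by rw [pvFill_getD_ge xs v (now + 1) i i (by omega)]; exact hv)]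
        rw [harr]
        exact ih (i + 1) i (by omega) (by omega) (by omega) (by omega)
          (fun j hj1 hj2 => by omega)
      · rw [bLoopGo_nv v _ _ i (some p) (by rw [hget]; exact hv)]
        exact ih (i + 1) p (by omega) hp1 (by omega) (by omega)
          (fun j hj1 hj2 => by
            by_cases hji : j = i
            · rwa [hji]
            · exact hnov j hj1 (by omega))

-- the combined invariant: A at index i aligned with B carrying the last seen
-- occurrence; first conjunct: at a fresh occurrence of v, second: walking with the
-- last occurrence p more than a window behind.
theorem combined (v : Int) :
    ∀ (k : Nat) (xs : List Int) (i : Nat), xs.length - i ≤ k →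
      ((i < xs.length → xs.getD i 0 = v →
          aPassGo v k xs i = bLoopGo v (xs.length - (i + 1)) xs (i + 1) (some i)) ∧
       (∀ p, p < i → (∀ j, p < j → j < min xs.length (p + 101) → xs.getD j 0 ≠ v) →
          aPassGo v k xs i = bLoopGo v (xs.length - i) xs i (some p))) := by
  intro k
  induction k with
  | zero =>
    intro xs i hk
    constructor
    · intro h; exact absurd h (by omega)
    · intro p _ _
      rw [show xs.length - i = 0 by omega]
      rfl
  | succ m ih =>
    intro xs i hk
    by_cases hge : i < xs.length
    · have hmain : i < xs.length → xs.getD i 0 = v →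
          aPassGo v (m + 1) xs i = bLoopGo v (xs.length - (i + 1)) xs (i + 1) (some i) := by
        intro _ hv
        rcases aLast_cases xs v i with ⟨h1, h2⟩ | ⟨h1, h2, h3, h4⟩
        · -- no other occurrence in the window: A stays, B walks with last = i
          rw [aPassGo_stay v m xs i hge hv h1, h1,
            pvFill_empty xs v (i + 1) (i + 1) (le_refl _)]
          exact ((ih xs (i + 1) (by omega)).2) i (by omega) h2
        · -- occurrences in the window: A fills and jumps to L := aLast
          rw [aPassGo_jump v m xs i hge hv (by omega)]
          have hL1 : aLast xs v i < xs.length := by omega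
          have hys : (pvFill xs v (i + 1) (aLast xs v i + 1)).getD (aLast xs v i) 0 = v :=
            pvFill_getD_in xs v (i + 1) (aLast xs v i + 1) (aLast xs v i) h1 (by omega) hL1
          have step1 := ((ih (pvFill xs v (i + 1) (aLast xs v i + 1)) (aLast xs v i)
            (by rw [pvFill_length]; omega)).1) (by rw [pvFill_length]; exact hL1) hys
          simp only [pvFill_length] at step1
          rw [step1]
          have step2 := bridge v xs i (aLast xs v i) hL1 (by omega) h3
            (aLast xs v i + 1) (i + 1) i (by omega) (le_refl i) (by omega) (by omega)
            (fun j hj1 hj2 => by omega)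
          rw [pvFill_empty xs v (i + 1) (i + 1) (le_refl _)] at step2
          exact step2.symm
      refine ⟨hmain, ?_⟩
      intro p hp hwin
      rw [show xs.length - i = (xs.length - (i + 1)) + 1 by omega]
      by_cases hv : xs.getD i 0 = v
      · have hfar : ¬ i - p ≤ 100 := by
          by_cases hcase : i < p + 101
          · exact absurd hv (hwin i (by omega) (by omega))
          · omega
        rw [bLoopGo_far v _ xs i p hv hfar]
        exact hmain hge hv
      · rw [aPassGo_nv v m xs i hge hv, bLoopGo_nv v _ xs i (some p) hv]
        exact ((ih xs (i + 1) (by omega)).2) p (by omega) hwin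
    · constructor
      · intro h; exact absurd h hge
      · intro p _ _
        rw [aPassGo_stop v m xs i hge, show xs.length - i = 0 by omega]
        rfl

theorem start_pass (v : Int) :
    ∀ (k : Nat) (xs : List Int) (i : Nat), xs.length - i ≤ k →
      aPassGo v k xs i = bLoopGo v (xs.length - i) xs i none := by
  intro k
  induction k with
  | zero =>
    intro xs i hk
    rw [show xs.length - i = 0 by omega]
    rfl
  | succ m ih =>
    intro xs i hk
    by_cases hge : i < xs.length
    · rw [show xs.length - i = (xs.length - (i + 1)) + 1 by omega]
      by_cases hv : xs.getD i 0 = v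
      · rw [bLoopGo_none v _ xs i hv]
        exact ((combined v (m + 1) xs i (by omega)).1) hge hv
      · rw [aPassGo_nv v m xs i hge hv, bLoopGo_nv v _ xs i none hv]
        exact ih xs (i + 1) (by omega)
    · rw [aPassGo_stop v m xs i hge, show xs.length - i = 0 by omega]
      rfl

theorem pass_eq (v : Int) (xs : List Int) :
    aPassGo v xs.length xs 0 = bLoopGo v xs.length xs 0 none := by
  have h := start_pass v xs.length xs 0 (by omega)
  simpa using h

-- A's third pass never changes the status array: its backward loop's first index is
-- i-1, where status[i-1] ≠ 1 holds in the only branch that runs it.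
theorem third_step_snd (m_t : List Int) (s : List Int × List Int) (i : Nat) (h : 1 ≤ i) :
    (aThirdStep m_t s i).2 = s.2 := by
  unfold aThirdStep
  by_cases h1 : s.2.getD i 0 = 1
  · rw [if_pos h1]
    by_cases h2 : s.2.getD (i - 1) 0 = 1
    · rw [if_pos h2]
    · rw [if_neg h2]
      have hr : (List.range i).reverse = (i - 1) :: (List.range (i - 1)).reverse := by
        rw [show i = i - 1 + 1 by omega, List.range_succ]
        simp
      split
      · rw [hr]
        simp only [aBack, if_neg h2]
      · rfl
  · rw [if_neg h1]

theorem third_pass_id (m_t : List Int) :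
    ∀ (js : List Nat) (s : List Int × List Int), (∀ i ∈ js, 1 ≤ i) →
      (js.foldl (aThirdStep m_t) s).2 = s.2 := by
  intro js
  induction js with
  | nil => intro s _; rfl
  | cons j r ih =>
    intro s hj
    rw [List.foldl_cons]
    rw [ih _ (fun i hi => hj i (List.mem_cons_of_mem j hi))]
    exact third_step_snd m_t s j (hj j List.mem_cons_self)

-- ===== VERDICT (by name: the statement is the Claim_ definition above) =====
theorem smooth_status_spec : Claim_equal_smooth_status := by
  intro status_ m_t _ _
  unfold Spec_smooth_status smooth_status smooth_status_alt
  rw [third_pass_id]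
  · simp only [pass_eq]
  · intro i hi
    have := List.mem_range'_1.1 hi
    omega
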